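-- pv_equiv track=rewrite | github.com/inaciovasquez2020/cyclone-terminal-obstruction | scripts/search_circuit_kernel.py | is_circuit
-- ===== SOURCE A (Python) =====
-- def is_kernel(rows: list[int], x: int) -> bool:
--     for row in rows:
--         if ((row & x).bit_count() & 1) != 0:
--             return False
--     return True
--
-- def is_circuit(rows: list[int], x: int) -> bool:
--     if x == 0 or not is_kernel(rows, x):
--         return False
--     y = x
--     while y:
--         b = y & -y
--         if is_kernel(rows, x ^ b):
--             return False
--         y ^= b
--     return True
-- ===== SOURCE B (Python) =====
-- def is_circuit(rows: list[int], x: int) -> bool: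
--     # One pass: check the kernel parity test row by row while accumulating the OR of
--     # all rows; x is a circuit iff it is a nonzero kernel vector all of whose
--     # bits are covered by some row (dropping an uncovered bit would stay in the
--     # kernel, so x would not be minimal).
--     union = 0
--     for row in rows:
--         union |= row
--         if (row & x).bit_count() & 1:
--             return False
--     return x != 0 and (x & ~union) == 0
-- ===== Notes on version B (the rewrite author's own statement) =====
-- stated objective: simpler
-- what changed: A re-tests kernel membership of x^b for every set bit b of x (an inner pass over rows per bit); B makes one pass over rows, checking the kernel parity test while accumulating the OR of all rows, and decides minimality by the single mask test (x & ~union) == 0, since dropping bit b keeps x in the kernel iff no row has bit b set.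
-- outside the precondition, e.g. on is_circuit([-5], -5): A returns False, B returns True; on is_circuit([-1], -6): A does not finish within the time limit, B returns True; on is_circuit([], -1): A returns False, B returns False
import Mathlib
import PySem

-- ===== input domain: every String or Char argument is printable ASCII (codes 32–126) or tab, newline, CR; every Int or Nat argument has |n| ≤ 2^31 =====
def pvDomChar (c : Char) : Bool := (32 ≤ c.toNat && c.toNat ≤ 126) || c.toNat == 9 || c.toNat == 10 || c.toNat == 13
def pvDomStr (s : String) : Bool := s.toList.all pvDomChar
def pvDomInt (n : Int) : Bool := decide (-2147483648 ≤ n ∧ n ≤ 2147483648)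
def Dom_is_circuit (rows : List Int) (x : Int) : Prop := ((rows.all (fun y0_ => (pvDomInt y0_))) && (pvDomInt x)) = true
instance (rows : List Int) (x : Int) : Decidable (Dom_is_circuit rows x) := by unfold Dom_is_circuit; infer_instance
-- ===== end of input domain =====

-- B replaces A's per-bit loop (one kernel re-test of x^b per set bit of x) by a single
-- pass that ORs all rows together: a nonzero kernel vector is a circuit iff every one of
-- its bits is covered by some row.  Objective: simpler (one pass, no inner while loop).

-- ===== PORT A =====
def is_kernel : List Int → Int → Bool
  | [], _ => true
  | row :: rest, x =>
    if PySem.Int.bitCount (PySem.Int.band row x) &&& 1 ≠ 0 then false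
    else is_kernel rest x

def circuitLoop (rows : List Int) (x : Int) : Nat → Int → Bool
  | 0, _ => true                                   -- fuel guard only; never reached inside Pre_
  | fuel + 1, y =>
    if y = 0 then true
    else
      let b := PySem.Int.band y (-y)
      if is_kernel rows (PySem.Int.bxor x b) then false
      else circuitLoop rows x fuel (PySem.Int.bxor y b)

def is_circuit (rows : List Int) (x : Int) : Bool :=
  if x = 0 || !is_kernel rows x then false
  else circuitLoop rows x (x.natAbs + 1) x

-- ===== PORT B =====
def altGo (x : Int) : List Int → Int → Bool
  | [], union => decide (x ≠ 0) && decide (PySem.Int.band x (Int.not union) = 0)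
  | row :: rest, union =>
    let u2 := PySem.Int.bor union row
    if PySem.Int.bitCount (PySem.Int.band row x) &&& 1 ≠ 0 then false
    else altGo x rest u2

def is_circuit_alt (rows : List Int) (x : Int) : Bool := altGo x rows 0

-- ===== PRECONDITION & SPEC =====
-- Pre_ excludes negative x that lie in the kernel of all rows: there A's bit-clearing loop
-- either diverges (y stays negative forever) or returns only by an accident of Python's
-- infinite two's-complement masks, while B's union test reports minimality as intended.
def Pre_is_circuit (rows : List Int) (x : Int) : Prop :=
  0 ≤ x ∨ ∃ r ∈ rows, PySem.Int.bitCount (PySem.Int.band r x) &&& 1 ≠ 0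
instance (rows : List Int) (x : Int) : Decidable (Pre_is_circuit rows x) := by
  unfold Pre_is_circuit; infer_instance

def pvWitness_is_circuit : List Int × Int := ([7], 3)

def Spec_is_circuit (rows : List Int) (x : Int) (out : Bool) : Prop := out = is_circuit_alt rows x
instance (rows : List Int) (x : Int) (out : Bool) : Decidable (Spec_is_circuit rows x out) := by
  unfold Spec_is_circuit; infer_instance

-- ===== CLAIM (what is proved, stated in full; the proofs are below) =====
def Claim_equal_is_circuit : Prop := ∀ (rows : List Int) (x : Int), Dom_is_circuit rows x → Pre_is_circuit rows x → Spec_is_circuit rows x (is_circuit rows x)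

-- ===== LEMMAS AND PROOFS =====

-- the k-th bit of a Python integer in infinite two's complement
def intBit : Int → Nat → Bool
  | Int.ofNat m, k => m.testBit k
  | Int.negSucc m, k => !(m.testBit k)

lemma xor_mod_two (a b : Nat) : (a ^^^ b) % 2 = (a % 2 + b % 2) % 2 := by
  have h := Nat.testBit_xor a b 0
  simp only [Nat.testBit_zero] at h
  rcases Nat.mod_two_eq_zero_or_one a with h1 | h1 <;>
    rcases Nat.mod_two_eq_zero_or_one b with h2 | h2 <;>
      simp [h1, h2] at h ⊢ <;> omega

lemma natSub_land_eq_xor : ∀ (m s : Nat), s &&& m = s → m - s = m ^^^ s := by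
  intro m
  induction m using Nat.strong_induction_on with
  | _ m ih =>
    intro s h
    rcases Nat.eq_zero_or_pos m with hm | hm
    · subst hm
      have : s = 0 := by
        have := Nat.and_le_right (n := s) (m := 0)
        omega
      simp [this]
    · have hsle : s ≤ m := h ▸ Nat.and_le_right
      have hdiv : (s / 2) &&& (m / 2) = s / 2 := by
        rw [← Nat.and_div_two, h]
      have ihh : m / 2 - s / 2 = m / 2 ^^^ s / 2 := ih (m / 2) (Nat.div_lt_self hm (by norm_num)) (s / 2) hdiv
      have hb0 : s % 2 ≤ m % 2 := by
        have h0 : (s.testBit 0 && m.testBit 0) = s.testBit 0 := by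
          rw [← Nat.testBit_and, h]
        simp only [Nat.testBit_zero] at h0
        rcases Nat.mod_two_eq_zero_or_one s with a | a <;>
          rcases Nat.mod_two_eq_zero_or_one m with b | b <;> simp [a, b] at h0 ⊢
      have hx2 : (m ^^^ s) % 2 = (m % 2 + s % 2) % 2 := xor_mod_two m s
      have hx3 : (m ^^^ s) / 2 = m / 2 ^^^ s / 2 := Nat.xor_div_two
      have hsle2 : s / 2 ≤ m / 2 := hdiv ▸ Nat.and_le_right
      have e1 : m = 2 * (m / 2) + m % 2 := by omega
      have e2 : s = 2 * (s / 2) + s % 2 := by omega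
      have e3 : (m ^^^ s) = 2 * ((m ^^^ s) / 2) + (m ^^^ s) % 2 := by omega
      rw [hx3] at e3
      omega

lemma land_sub_self (X n : Nat) : (X &&& n) &&& X = X &&& n := by
  apply Nat.eq_of_testBit_eq
  intro k
  simp only [Nat.testBit_and]
  cases X.testBit k <;> cases n.testBit k <;> rfl

lemma band_coe_right (r : Int) (X : Nat) :
    ∃ R : Nat, PySem.Int.band r (X : Int) = (R : Int) ∧
      ∀ k, R.testBit k = (intBit r k && X.testBit k) := by
  cases r with
  | ofNat m =>
    refine ⟨m &&& X, ?_, ?_⟩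
    · have := PySem.Int.band_natCast m X
      simpa using this
    · intro k; simp [intBit, Nat.testBit_and]
  | negSucc n =>
    refine ⟨X ^^^ (X &&& n), ?_, ?_⟩
    · have hneg : ¬ (0 : Int) ≤ Int.negSucc n := by simp [Int.negSucc_eq]; omega
      have ht : (-(Int.negSucc n) - 1).toNat = n := by
        simp [Int.negSucc_eq]
      rw [PySem.Int.band]
      simp only [hneg, if_false, if_pos (by positivity : (0:Int) ≤ (X:Int)), Int.toNat_natCast, ht]
      rw [natSub_land_eq_xor X (X &&& n) (land_sub_self X n)]
    · intro k
      simp only [Nat.testBit_xor, Nat.testBit_and, intBit]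
      cases X.testBit k <;> cases n.testBit k <;> rfl

lemma neg_coe_sub_one_eq_negSucc (N : Nat) : -(N : Int) - 1 = Int.negSucc N := by
  simp [Int.negSucc_eq]; ring

lemma intBit_bor (a b : Int) (k : Nat) :
    intBit (PySem.Int.bor a b) k = (intBit a k || intBit b k) := by
  have hofpos : ∀ m : Nat, (0 : Int) ≤ Int.ofNat m := fun m => Int.natCast_nonneg m
  have hnspos : ∀ m : Nat, ¬ (0 : Int) ≤ Int.negSucc m := by
    intro m; simp [Int.negSucc_eq]; omega
  have htns : ∀ m : Nat, (-(Int.negSucc m) - 1).toNat = m := by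
    intro m; simp [Int.negSucc_eq]
  have htof : ∀ m : Nat, (Int.ofNat m).toNat = m := fun m => rfl
  cases a with
  | ofNat m =>
    cases b with
    | ofNat n =>
      rw [PySem.Int.bor, if_pos (hofpos m), if_pos (hofpos n), htof, htof]
      simp only [intBit, Nat.testBit_or]
    | negSucc n =>
      rw [PySem.Int.bor, if_pos (hofpos m), if_neg (hnspos n), htns, htof,
          natSub_land_eq_xor n (n &&& m) (land_sub_self n m), neg_coe_sub_one_eq_negSucc]
      simp only [intBit, Nat.testBit_xor, Nat.testBit_and]
      cases m.testBit k <;> cases n.testBit k <;> rfl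
  | negSucc m =>
    cases b with
    | ofNat n =>
      rw [PySem.Int.bor, if_neg (hnspos m), if_pos (hofpos n), htns, htof,
          natSub_land_eq_xor m (m &&& n) (land_sub_self m n), neg_coe_sub_one_eq_negSucc]
      simp only [intBit, Nat.testBit_xor, Nat.testBit_and]
      cases m.testBit k <;> cases n.testBit k <;> rfl
    | negSucc n =>
      rw [PySem.Int.bor, if_neg (hnspos m), if_neg (hnspos n), htns, htns,
          neg_coe_sub_one_eq_negSucc]
      simp only [intBit, Nat.testBit_and]
      cases m.testBit k <;> cases n.testBit k <;> rfl

lemma intBit_not (u : Int) (k : Nat) : intBit (Int.not u) k = !(intBit u k) := by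
  cases u <;> simp [Int.not, intBit]

lemma band_not_eq_zero_iff (X : Nat) (u : Int) :
    PySem.Int.band (X : Int) (Int.not u) = 0 ↔
      ∀ k, X.testBit k = true → intBit u k = true := by
  rw [PySem.Int.band_comm]
  obtain ⟨R, hR, hbit⟩ := band_coe_right (Int.not u) X
  rw [hR]
  constructor
  · intro h k hk
    have hR0 : R = 0 := by exact_mod_cast h
    have := hbit k
    rw [hR0, Nat.zero_testBit, intBit_not, hk] at this
    cases hu : intBit u k
    · rw [hu] at this; simp at this
    · rfl
  · intro h
    have : R = 0 := by
      apply Nat.eq_of_testBit_eq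
      intro k
      rw [hbit k, Nat.zero_testBit, intBit_not]
      cases hx : X.testBit k
      · simp
      · simp [h k hx]
    rw [this]; rfl

lemma nat_lowbit : ∀ Y : Nat, 0 < Y → ∃ i, Y.testBit i = true ∧ Y &&& (Y - 1) = Y ^^^ 2 ^ i := by
  intro Y
  induction Y using Nat.strong_induction_on with
  | _ Y ih =>
    intro hY
    rcases Nat.mod_two_eq_zero_or_one Y with he | ho
    · -- even
      have hM : 0 < Y / 2 := by omega
      obtain ⟨i, hbit, heq⟩ := ih (Y / 2) (by omega) hM
      refine ⟨i + 1, ?_, ?_⟩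
      · rw [← Nat.testBit_div_two]; exact hbit
      · apply Nat.eq_of_testBit_eq
        intro k
        cases k with
        | zero =>
          have d1 : Y.testBit 0 = false := by rw [Nat.testBit_zero]; simp; omega
          have d2 : (2 ^ (i + 1)).testBit 0 = false := by
            rw [Nat.testBit_two_pow]; simp
          rw [Nat.testBit_and, Nat.testBit_xor, d1, d2]
          cases (Y - 1).testBit 0 <;> rfl
        | succ k =>
          have h1 : (Y &&& (Y - 1)).testBit (k + 1) = ((Y / 2) &&& ((Y - 1) / 2)).testBit k := by
            rw [← Nat.and_div_two, Nat.testBit_div_two]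
          have h2 : (Y - 1) / 2 = Y / 2 - 1 := by omega
          rw [h1, h2, heq, Nat.testBit_xor, Nat.testBit_xor, Nat.testBit_two_pow,
              Nat.testBit_two_pow, ← Nat.testBit_div_two]
          congr 1
          simp
    · -- odd
      refine ⟨0, ?_, ?_⟩
      · simp [Nat.testBit_zero, ho]
      · apply Nat.eq_of_testBit_eq
        intro k
        cases k with
        | zero =>
          have d1 : Y.testBit 0 = true := by rw [Nat.testBit_zero]; simp [ho]
          have d2 : (Y - 1).testBit 0 = false := by rw [Nat.testBit_zero]; simp; omega
          have d3 : ((2 : Nat) ^ (0 : Nat)).testBit 0 = true := by rw [Nat.testBit_two_pow]; simp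
          rw [Nat.testBit_and, Nat.testBit_xor, d1, d2, d3]
          rfl
        | succ k =>
          have h1 : (Y &&& (Y - 1)).testBit (k + 1) = ((Y / 2) &&& ((Y - 1) / 2)).testBit k := by
            rw [← Nat.and_div_two, Nat.testBit_div_two]
          have h2 : (Y - 1) / 2 = Y / 2 := by omega
          rw [h1, h2, Nat.testBit_and, Nat.testBit_xor, Nat.testBit_two_pow,
              ← Nat.testBit_div_two]
          cases (Y / 2).testBit k <;> simp

lemma int_lowbit (Y : Nat) (h : 0 < Y) :
    ∃ i, Y.testBit i = true ∧ PySem.Int.band (Y : Int) (-(Y : Int)) = ((2 ^ i : Nat) : Int) := by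
  obtain ⟨i, hbit, heq⟩ := nat_lowbit Y h
  refine ⟨i, hbit, ?_⟩
  have hneg : ¬ (0 : Int) ≤ -(Y : Int) := by omega
  have ht : (-(-(Y : Int)) - 1).toNat = Y - 1 := by omega
  rw [PySem.Int.band, if_pos (by positivity : (0:Int) ≤ (Y:Int)), if_neg hneg, ht,
      Int.toNat_natCast]
  have hsub : Y - (Y ^^^ 2 ^ i) = Y ^^^ (Y ^^^ 2 ^ i) := by
    apply natSub_land_eq_xor
    apply Nat.eq_of_testBit_eq
    intro k
    simp only [Nat.testBit_and, Nat.testBit_xor, Nat.testBit_two_pow]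
    by_cases hk : i = k
    · subst hk; simp [hbit]
    · simp [hk]
  rw [heq, hsub, ← Nat.xor_assoc, Nat.xor_self, Nat.zero_xor]

lemma pcn_halve (n : Nat) :
    PySem.Int.bitCount (n : Int) = n % 2 + PySem.Int.bitCount ((n / 2 : Nat) : Int) := by
  rcases Nat.eq_zero_or_pos n with h | h
  · subst h; decide
  · exact PySem.Int.bitCount_natCast h

lemma pcn_par (a b : Nat) :
    PySem.Int.bitCount ((a ^^^ b : Nat) : Int) % 2
      = (PySem.Int.bitCount (a : Int) + PySem.Int.bitCount (b : Int)) % 2 := by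
  have H : ∀ n : Nat, ∀ a b : Nat, a + b ≤ n →
      PySem.Int.bitCount ((a ^^^ b : Nat) : Int) % 2
        = (PySem.Int.bitCount (a : Int) + PySem.Int.bitCount (b : Int)) % 2 := by
    intro n
    induction n using Nat.strong_induction_on with
    | _ n ih =>
      intro a b hab
      by_cases h : a ≤ 1 ∧ b ≤ 1
      · obtain ⟨h1, h2⟩ := h
        interval_cases a <;> interval_cases b <;> decide
      · have hpos : 0 < a + b := by
          rcases Nat.eq_zero_or_pos (a + b) with hz | hz
          · exfalso; exact h ⟨by omega, by omega⟩
          · exact hz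
        have hlt : a / 2 + b / 2 < n := by omega
        have ihh := ih (a / 2 + b / 2) (by omega) (a / 2) (b / 2) le_rfl
        rw [pcn_halve (a ^^^ b), pcn_halve a, pcn_halve b, Nat.xor_div_two, xor_mod_two]
        omega
  exact H (a + b) a b le_rfl

lemma pcn_two_pow (i : Nat) : PySem.Int.bitCount ((2 ^ i : Nat) : Int) = 1 := by
  induction i with
  | zero => decide
  | succ i ih =>
    rw [pcn_halve]
    have h1 : 2 ^ (i + 1) % 2 = 0 := by simp [Nat.pow_succ]
    have h2 : 2 ^ (i + 1) / 2 = 2 ^ i := by rw [Nat.pow_succ]; omega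
    rw [h1, h2, ih]


-- apply H

lemma is_kernel_iff (rows : List Int) (z : Int) :
    is_kernel rows z = true ↔ ∀ r ∈ rows, PySem.Int.bitCount (PySem.Int.band r z) % 2 = 0 := by
  induction rows with
  | nil => simp [is_kernel]
  | cons r rest ih =>
    rw [is_kernel]
    by_cases h : PySem.Int.bitCount (PySem.Int.band r z) &&& 1 ≠ 0
    · rw [if_pos h]
      simp only [Nat.and_one_is_mod] at h
      constructor
      · intro hf; exact absurd hf (by simp)
      · intro hall; exact absurd (hall r (by simp)) (by omega)
    · rw [if_neg h]
      simp only [Nat.and_one_is_mod] at h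
      rw [ih]
      constructor
      · intro hall r' hr'
        rcases List.mem_cons.mp hr' with he | hm
        · subst he; omega
        · exact hall r' hm
      · intro hall r' hr'; exact hall r' (List.mem_cons_of_mem _ hr')

lemma row_flip (r : Int) (X i : Nat) (hx : X.testBit i = true) :
    PySem.Int.bitCount (PySem.Int.band r ((X ^^^ 2 ^ i : Nat) : Int)) % 2
      = (PySem.Int.bitCount (PySem.Int.band r (X : Int)) % 2
          + (if intBit r i then 1 else 0)) % 2 := by
  obtain ⟨R, hR, hRb⟩ := band_coe_right r X
  obtain ⟨R', hR', hRb'⟩ := band_coe_right r (X ^^^ 2 ^ i)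
  rw [hR, hR']
  have hchar : R' = R ^^^ (if intBit r i then 2 ^ i else 0) := by
    apply Nat.eq_of_testBit_eq
    intro k
    rw [hRb' k, Nat.testBit_xor, Nat.testBit_xor, hRb k, Nat.testBit_two_pow]
    by_cases hk : i = k
    · subst hk
      cases hb : intBit r i <;> simp [hx]
    · cases hb : intBit r i <;> simp [hk, Nat.zero_testBit]
  rw [hchar, pcn_par]
  cases hb : intBit r i
  · simp
  · rw [if_pos rfl, if_pos rfl, pcn_two_pow]; omega

lemma intBit_zero (k : Nat) : intBit 0 k = false := by
  simp [intBit, Nat.zero_testBit]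

lemma intBit_foldl_bor (rows : List Int) (u : Int) (k : Nat) :
    intBit (rows.foldl PySem.Int.bor u) k = (intBit u k || rows.any (fun r => intBit r k)) := by
  induction rows generalizing u with
  | nil => simp
  | cons r rest ih =>
    rw [List.foldl_cons, ih, intBit_bor]
    simp [Bool.or_assoc]

lemma altGo_eq (x : Int) (rows : List Int) (u : Int) :
    altGo x rows u =
      if is_kernel rows x then
        decide (x ≠ 0) && decide (PySem.Int.band x (Int.not (rows.foldl PySem.Int.bor u)) = 0)
      else false := by
  induction rows generalizing u with
  | nil => rfl
  | cons r rest ih =>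
    rw [altGo]
    by_cases h : PySem.Int.bitCount (PySem.Int.band r x) &&& 1 ≠ 0
    · rw [if_pos h, is_kernel, if_pos h]
      simp
    · rw [if_neg h, ih, is_kernel, if_neg h]
      rfl

lemma loop_eq (rows : List Int) (X : Nat) (hk : is_kernel rows (X : Int) = true) :
    ∀ (fuel : Nat) (Y : Nat), (∀ k, Y.testBit k = true → X.testBit k = true) → Y < fuel →
      circuitLoop rows (X : Int) fuel (Y : Int)
        = decide (PySem.Int.band (Y : Int) (Int.not (rows.foldl PySem.Int.bor 0)) = 0) := by
  intro fuel
  induction fuel with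
  | zero => intro Y _ h; omega
  | succ fuel ih =>
    intro Y hsub hlt
    rcases Nat.eq_zero_or_pos Y with hY0 | hYpos
    · subst hY0
      rw [circuitLoop, if_pos (by norm_num)]
      have : PySem.Int.band ((0 : Nat) : Int) (Int.not (rows.foldl PySem.Int.bor 0)) = 0 := by
        rw [band_not_eq_zero_iff]
        intro k hkk
        rw [Nat.zero_testBit] at hkk
        exact absurd hkk (by simp)
      rw [Nat.cast_zero] at this ⊢
      simp [this]
    · obtain ⟨i, hYi, hlow⟩ := int_lowbit Y hYpos
      have hXi : X.testBit i = true := hsub i hYi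
      rw [circuitLoop, if_neg (by exact_mod_cast Nat.pos_iff_ne_zero.mp hYpos)]
      simp only
      rw [hlow]
      have hbxor : PySem.Int.bxor (X : Int) ((2 ^ i : Nat) : Int) = ((X ^^^ 2 ^ i : Nat) : Int) := by
        rw [PySem.Int.bxor_natCast]
      rw [hbxor]
      have hU := intBit_foldl_bor rows 0
      have hker' : is_kernel rows ((X ^^^ 2 ^ i : Nat) : Int) = true
          ↔ intBit (rows.foldl PySem.Int.bor 0) i = false := by
        rw [is_kernel_iff]
        constructor
        · intro hall
          rw [hU i, intBit_zero]
          simp only [Bool.false_or]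
          rw [List.any_eq_false]
          intro r hr
          have h1 := hall r hr
          rw [row_flip r X i hXi] at h1
          have h2 := (is_kernel_iff rows ((X : Nat) : Int)).mp hk r hr
          cases hb : intBit r i
          · simp
          · rw [hb] at h1; simp at h1; omega
        · intro hUi r hr
          rw [row_flip r X i hXi]
          have h2 := (is_kernel_iff rows ((X : Nat) : Int)).mp hk r hr
          have hb : intBit r i = false := by
            rw [hU i, intBit_zero] at hUi
            simp only [Bool.false_or, List.any_eq_false] at hUi
            simpa using hUi r hr
          rw [hb]; simpa using h2
      by_cases hkb : is_kernel rows ((X ^^^ 2 ^ i : Nat) : Int) = true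
      · rw [if_pos hkb]
        have hUi := hker'.mp hkb
        have : ¬ PySem.Int.band (Y : Int) (Int.not (rows.foldl PySem.Int.bor 0)) = 0 := by
          rw [band_not_eq_zero_iff]
          intro hall
          rw [hall i hYi] at hUi
          simp at hUi
        simp [this]
      · rw [if_neg hkb]
        have hUi : intBit (rows.foldl PySem.Int.bor 0) i = true := by
          cases hc : intBit (rows.foldl PySem.Int.bor 0) i
          · exact absurd (hker'.mpr hc) hkb
          · rfl
        have hsub2i : (2 ^ i) &&& Y = 2 ^ i := by
          apply Nat.eq_of_testBit_eq
          intro k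
          rw [Nat.testBit_and, Nat.testBit_two_pow]
          by_cases hki : i = k
          · subst hki; simp [hYi]
          · simp [hki]
        have hYxor : Y ^^^ 2 ^ i = Y - 2 ^ i := by
          rw [← natSub_land_eq_xor Y (2 ^ i) hsub2i]
        have hge : 2 ^ i ≤ Y := Nat.ge_two_pow_of_testBit hYi
        have hbxorY : PySem.Int.bxor (Y : Int) ((2 ^ i : Nat) : Int) = ((Y ^^^ 2 ^ i : Nat) : Int) := by
          rw [PySem.Int.bxor_natCast]
        rw [hbxorY, ih (Y ^^^ 2 ^ i) ?_ ?_]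
        · -- both sides' decide arguments are equivalent
          congr 1
          rw [eq_iff_iff, band_not_eq_zero_iff, band_not_eq_zero_iff]
          constructor
          · intro h k hkk
            by_cases hki : i = k
            · subst hki; exact hUi
            · apply h k
              rw [Nat.testBit_xor, hkk, Nat.testBit_two_pow]
              simp [hki]
          · intro h k hkk
            rw [Nat.testBit_xor, Nat.testBit_two_pow] at hkk
            by_cases hki : i = k
            · subst hki; exact hUi
            · apply h k
              simp [hki] at hkk
              exact hkk
        · intro k hkk
          apply hsub
          rw [Nat.testBit_xor, Nat.testBit_two_pow] at hkk
          by_cases hki : i = k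
          · subst hki; simp [hYi] at hkk
          · simp [hki] at hkk; exact hkk
        · have h1 : 1 ≤ 2 ^ i := Nat.one_le_two_pow
          omega

-- ===== VERDICT (by name: the statement is the Claim_ definition above) =====
theorem is_circuit_spec : Claim_equal_is_circuit := by
  intro rows x _ hpre
  unfold Spec_is_circuit
  rw [is_circuit, is_circuit_alt, altGo_eq]
  by_cases hk : is_kernel rows x = true
  · rw [if_pos hk]
    by_cases hx0 : x = 0
    · subst hx0; simp
    · have hxnn : 0 ≤ x := by
        rcases hpre with h | ⟨r, hr, hodd⟩
        · exact h
        · exfalso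
          have := (is_kernel_iff rows x).mp hk r hr
          rw [Nat.and_one_is_mod] at hodd
          omega
      obtain ⟨X, rfl⟩ := Int.eq_ofNat_of_zero_le hxnn
      have hXpos : 0 < X := by
        by_contra h
        exact hx0 (by omega)
      rw [if_neg (by simp [hk]; omega)]
      have hfuel : X < ((X : Int).natAbs + 1) := by simp
      rw [show ((X : Int).natAbs + 1) = X + 1 by simp]
      rw [loop_eq rows X hk (X + 1) X (fun k h => h) (by omega)]
      have hX0 : ¬ X = 0 := by omega
      simp [hX0]
  · simp only [Bool.not_eq_true] at hk
    rw [hk]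
    simp
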